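-- pv_equiv track=rewrite | github.com/notblisy/RUBYSAPPHIREDLC | SOURCE/scripts/asmquote.py | asmQuote
-- ===== SOURCE A (Python) =====
-- asmProblemBytes = ['\x00', '\x09', '\x0A', '\x22']
--
-- def asmQuote(t):
-- 	result = ""
-- 	quoted = False
-- 	if t[0] in asmProblemBytes:
-- 		result = '{0}'.format(ord(t[0]))
-- 	else:
-- 		result = '"' + t[0]
-- 		quoted = True
-- 	t = t[1:]
--
-- 	while len(t):
-- 		if quoted and t[0] in asmProblemBytes:
-- 			result += '",{0}'.format(ord(t[0]))
-- 			quoted = False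
-- 		elif quoted:
-- 			result += t[0]
-- 		elif t[0] in asmProblemBytes:
-- 			result += ',{0}'.format(ord(t[0]))
-- 			quoted = False
-- 		else:
-- 			result += ',"' + t[0]
-- 			quoted = True
-- 		t = t[1:]
-- 	if quoted:
-- 		result += '"'
-- 	return result
-- ===== SOURCE B (Python) =====
-- # B: tokenise into groups (numeric tokens for problem bytes, one quoted token
-- # per maximal run of normal bytes) and comma-join once, instead of A's
-- # character-at-a-time state machine with repeated string slicing.
-- asmProblemBytes = ['\x00', '\x09', '\x0A', '\x22']
--
-- def asmQuote(t):
--     tokens = []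
--     i = 0
--     n = len(t)
--     while i < n:
--         if t[i] in asmProblemBytes:
--             tokens.append(str(ord(t[i])))
--             i += 1
--         else:
--             j = i
--             while j < n and t[j] not in asmProblemBytes:
--                 j += 1
--             tokens.append('"' + t[i:j] + '"')
--             i = j
--     return ','.join(tokens)
-- ===== Notes on version B (the rewrite author's own statement) =====
-- stated objective: faster
-- what changed: Replaces A's char-at-a-time quoted-flag state machine with repeated t=t[1:] slicing by a single indexed scan that tokenises maximal runs (one quoted token per run of normal chars, one numeric token per problem byte) and comma-joins the token list once.
-- outside the precondition, e.g. on asmQuote(''): A raises IndexError, B returns ''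
-- crash fix: On the empty string A raises IndexError at t[0]; B returns the empty string. — e.g. on asmQuote(""): A raises IndexError, B returns ""
import Mathlib
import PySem

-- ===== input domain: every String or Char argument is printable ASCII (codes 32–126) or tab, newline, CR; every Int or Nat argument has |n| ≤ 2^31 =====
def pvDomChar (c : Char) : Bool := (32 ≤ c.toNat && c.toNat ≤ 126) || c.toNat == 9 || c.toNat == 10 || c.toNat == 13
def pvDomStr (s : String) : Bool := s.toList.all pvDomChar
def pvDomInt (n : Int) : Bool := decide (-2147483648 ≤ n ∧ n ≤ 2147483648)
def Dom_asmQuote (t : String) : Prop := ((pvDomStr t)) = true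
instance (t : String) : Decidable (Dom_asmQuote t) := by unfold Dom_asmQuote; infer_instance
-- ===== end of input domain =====

-- B reformulates A's char-at-a-time quoted-state machine as tokenise-then-join (objective: alternative decomposition; avoids A's repeated slicing).

-- ===== PORT A =====
def pvBad (c : Char) : Bool := [(Char.ofNat 0), '\t', '\n', '"'].contains c

def pvOrdStr (c : Char) : List Char := (PySem.Int.toStr (c.toNat : Int)).toList

def asmQuoteLoop : List Char → List Char → Bool → List Char
  | [], result, quoted => if quoted then result ++ ['"'] else result
  | c :: rest, result, quoted =>
    if quoted && pvBad c then asmQuoteLoop rest (result ++ ['"', ','] ++ pvOrdStr c) false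
    else if quoted then asmQuoteLoop rest (result ++ [c]) quoted
    else if pvBad c then asmQuoteLoop rest (result ++ [','] ++ pvOrdStr c) false
    else asmQuoteLoop rest (result ++ [',', '"', c]) true

def asmQuote (t : String) : String :=
  match t.toList with
  | [] => ""   -- Python A raises IndexError on t[0] here; excluded by Pre_asmQuote
  | c :: rest =>
    String.mk (if pvBad c then asmQuoteLoop rest (pvOrdStr c) false
               else asmQuoteLoop rest ('"' :: [c]) true)

-- ===== PORT B =====
-- inner while loop of B: split off the maximal run of non-problem chars
def pvSpan : List Char → List Char × List Char
  | [] => ([], [])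
  | c :: rest =>
    if pvBad c then ([], c :: rest)
    else
      let p := pvSpan rest
      (c :: p.1, p.2)

theorem pvSpan_len (l : List Char) : (pvSpan l).2.length ≤ l.length := by
  induction l with
  | nil => simp [pvSpan]
  | cons c rest ih =>
    simp only [pvSpan]
    split
    · simp
    · simpa using Nat.le_succ_of_le ih

def pvTokens : List Char → List (List Char)
  | [] => []
  | c :: rest =>
    if pvBad c then pvOrdStr c :: pvTokens rest
    else
      let p := pvSpan rest
      ('"' :: c :: p.1 ++ ['"']) :: pvTokens p.2
termination_by l => l.length
decreasing_by
  · simp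
  · exact Nat.lt_succ_of_le (pvSpan_len rest)

def asmQuote_alt (t : String) : String :=
  String.mk (PySem.Chars.join [','] (pvTokens t.toList))

-- ===== PRECONDITION & SPEC =====
-- Pre_ excludes only the empty string, on which A raises IndexError at t[0].
def Pre_asmQuote (t : String) : Prop := t ≠ ""
instance (t : String) : Decidable (Pre_asmQuote t) := by unfold Pre_asmQuote; infer_instance
def pvWitness_asmQuote : String := "a\"b"

-- On the empty string A raises IndexError; B returns "".
def Raises_asmQuote (t : String) : Prop := t = ""
instance (t : String) : Decidable (Raises_asmQuote t) := by unfold Raises_asmQuote; infer_instance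
def pvRaiseWitness_asmQuote : String := ""
def pvRaiseWitnessOut_asmQuote : String := ""

def Spec_asmQuote (t : String) (out : String) : Prop := out = asmQuote_alt t
instance (t : String) (out : String) : Decidable (Spec_asmQuote t out) := by unfold Spec_asmQuote; infer_instance

-- ===== CLAIM (what is proved, stated in full; the proofs are below) =====
def Claim_equal_asmQuote : Prop := ∀ (t : String), Dom_asmQuote t → Pre_asmQuote t → Spec_asmQuote t (asmQuote t)
def Claim_raises_asmQuote : Prop := (∀ (t : String), Dom_asmQuote t → Raises_asmQuote t → ¬ Pre_asmQuote t) ∧ (Dom_asmQuote (pvRaiseWitness_asmQuote) ∧ Raises_asmQuote (pvRaiseWitness_asmQuote) ∧ asmQuote_alt (pvRaiseWitness_asmQuote) = pvRaiseWitnessOut_asmQuote)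

-- ===== LEMMAS AND PROOFS =====

-- suffix of the output contributed by the remaining chars when the state is unquoted
def pvCat (ts : List (List Char)) : List Char := (ts.map (List.cons ',')).flatten

theorem join_comma_cons (x : List Char) (ts : List (List Char)) :
    PySem.Chars.join [','] (x :: ts) = x ++ pvCat ts := by
  induction ts generalizing x with
  | nil => simp [PySem.Chars.join, pvCat, List.intercalate]
  | cons y ys ih =>
    simp only [PySem.Chars.join_cons_cons, ih, pvCat, List.map, List.flatten]
    simp

theorem loop_invariant : ∀ n (l : List Char), l.length ≤ n → ∀ r : List Char,
    (asmQuoteLoop l r false = r ++ pvCat (pvTokens l)) ∧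
    (asmQuoteLoop l r true = r ++ (pvSpan l).1 ++ ['"'] ++ pvCat (pvTokens (pvSpan l).2)) := by
  intro n
  induction n with
  | zero =>
    intro l hl r
    have : l = [] := List.length_eq_zero_iff.mp (Nat.le_zero.mp hl)
    subst this
    simp [asmQuoteLoop, pvTokens, pvSpan, pvCat]
  | succ n ih =>
    intro l hl r
    match l with
    | [] => simp [asmQuoteLoop, pvTokens, pvSpan, pvCat]
    | c :: rest =>
      have hrest : rest.length ≤ n := Nat.lt_succ_iff.mp (by simpa using hl)
      constructor
      · by_cases hb : pvBad c = true
        · -- unquoted, problem byte: emit ',' ++ digits, stay unquoted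
          rw [show asmQuoteLoop (c :: rest) r false
                = asmQuoteLoop rest (r ++ [','] ++ pvOrdStr c) false by simp [asmQuoteLoop, hb]]
          rw [(ih rest hrest _).1]
          simp [pvTokens, hb, pvCat]
        · -- unquoted, normal byte: open a quote
          rw [show asmQuoteLoop (c :: rest) r false
                = asmQuoteLoop rest (r ++ [',', '"', c]) true by simp [asmQuoteLoop, hb]]
          rw [(ih rest hrest _).2]
          simp only [pvTokens, hb, Bool.false_eq_true, if_false, pvCat, List.map, List.flatten]
          simp
      · by_cases hb : pvBad c = true
        · -- quoted, problem byte: close quote, emit digits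
          rw [show asmQuoteLoop (c :: rest) r true
                = asmQuoteLoop rest (r ++ ['"', ','] ++ pvOrdStr c) false by simp [asmQuoteLoop, hb]]
          rw [(ih rest hrest _).1]
          simp [pvSpan, hb, pvTokens, pvCat]
        · -- quoted, normal byte: append the char
          rw [show asmQuoteLoop (c :: rest) r true
                = asmQuoteLoop rest (r ++ [c]) true by simp [asmQuoteLoop, hb]]
          rw [(ih rest hrest _).2]
          simp [pvSpan, hb]

-- ===== VERDICT (by name: the statement is the Claim_ definition above) =====
theorem asmQuote_spec : Claim_equal_asmQuote := by
  unfold Claim_equal_asmQuote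
  intro t _ hpre
  unfold Spec_asmQuote asmQuote asmQuote_alt
  have hne : t.toList ≠ [] := by
    intro h
    exact hpre (String.toList_eq_nil_iff.mp h)
  obtain ⟨c, rest, hm⟩ : ∃ c rest, t.toList = c :: rest := by
    cases h : t.toList with
    | nil => exact absurd h hne
    | cons c rest => exact ⟨c, rest, rfl⟩
  rw [hm]
  show String.mk (if pvBad c = true then asmQuoteLoop rest (pvOrdStr c) false
                  else asmQuoteLoop rest ('"' :: [c]) true)
       = String.mk (PySem.Chars.join [','] (pvTokens (c :: rest)))
  refine congrArg String.mk ?_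
  by_cases hb : pvBad c = true
  · rw [if_pos hb, (loop_invariant rest.length rest le_rfl _).1]
    rw [show pvTokens (c :: rest) = pvOrdStr c :: pvTokens rest by simp [pvTokens, hb]]
    rw [join_comma_cons]
  · rw [if_neg hb, (loop_invariant rest.length rest le_rfl _).2]
    rw [show pvTokens (c :: rest) = ('"' :: c :: (pvSpan rest).1 ++ ['"']) :: pvTokens (pvSpan rest).2
          by simp [pvTokens, hb]]
    rw [join_comma_cons]
    simp

theorem pvAltEmpty : asmQuote_alt pvRaiseWitness_asmQuote = pvRaiseWitnessOut_asmQuote := by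
  show String.mk (PySem.Chars.join [','] (pvTokens "".toList)) = ""
  rw [show pvTokens "".toList = [] by simp [pvTokens]]
  rfl

@[simp] theorem asmQuote_raises : Claim_raises_asmQuote := by
  unfold Claim_raises_asmQuote
  exact ⟨fun t _ hr hp => hp hr, by decide, by decide, pvAltEmpty⟩
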